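-- pv_equiv track=rewrite | github.com/AustinJunyuLi/bids_pipeline | pipeline/normalize/quotes.py | compact_alnum_with_map
-- ===== SOURCE A (Python) =====
-- def compact_alnum_with_map(text: str, index_map: list[int]) -> tuple[str, list[int]]:
--     chars: list[str] = []
--     compact_map: list[int] = []
--
--     for index, char in enumerate(text):
--         if not char.isalnum():
--             continue
--         chars.append(char)
--         compact_map.append(index_map[index])
--
--     return "".join(chars), compact_map
-- ===== SOURCE B (Python) =====
-- def compact_alnum_with_map(text: str, index_map: list[int]) -> tuple[str, list[int]]:
--     # Run-based two-pointer scan: copy whole maximal alphanumeric runs as slices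
--     # instead of filtering character by character.
--     parts: list[str] = []
--     compact_map: list[int] = []
--     n = len(text)
--     i = 0
--     while i < n:
--         if not text[i].isalnum():
--             i += 1
--             continue
--         j = i
--         while j < n and text[j].isalnum():
--             j += 1
--         parts.append(text[i:j])
--         for k in range(i, j):
--             compact_map.append(index_map[k])
--         i = j
--     return "".join(parts), compact_map
-- ===== Notes on version B (the rewrite author's own statement) =====
-- stated objective: alternative
-- what changed: B replaces A's per-character filter loop with a two-pointer run scanner: an outer while finds each maximal alphanumeric run [i,j), appends the whole text slice text[i:j] at once and copies the mapped indices for that run, skipping non-alphanumeric gaps one at a time.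
import Mathlib
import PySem

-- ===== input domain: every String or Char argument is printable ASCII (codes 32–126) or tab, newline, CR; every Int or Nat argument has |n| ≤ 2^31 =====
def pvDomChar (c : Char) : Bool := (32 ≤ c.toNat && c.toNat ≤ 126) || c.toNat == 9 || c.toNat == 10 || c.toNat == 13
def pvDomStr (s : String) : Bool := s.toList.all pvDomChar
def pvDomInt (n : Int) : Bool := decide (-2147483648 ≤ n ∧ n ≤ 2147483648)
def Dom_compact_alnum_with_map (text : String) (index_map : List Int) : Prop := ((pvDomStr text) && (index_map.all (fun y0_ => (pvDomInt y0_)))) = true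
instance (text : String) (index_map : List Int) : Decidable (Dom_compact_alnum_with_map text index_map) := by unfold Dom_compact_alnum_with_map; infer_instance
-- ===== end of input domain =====

-- B replaces A's per-character filter loop with a two-pointer run scanner that copies
-- whole maximal alphanumeric runs (text slice + mapped indices per run) — alternative
-- decomposition, same cost.


-- ===== PORT A =====
-- one pass over enumerate(text), appending to both accumulators; index_map[index] is
-- PySem.List.pyGet? — the .getD 0 default is never reached under Pre_ (which excludes the IndexError)
def compact_alnum_with_map (text : String) (index_map : List Int) : String × List Int :=
  let st := (PySem.List.enumerate text.toList 0).foldl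
    (fun (acc : List Char × List Int) p =>
      if !(PySem.Chars.isalnum p.2) then acc
      else (acc.1 ++ [p.2], acc.2 ++ [(PySem.List.pyGet? index_map p.1).getD 0]))
    ([], [])
  (String.mk st.1, st.2)

-- ===== PORT B =====
-- inner while of Source B: advance j while j < n and text[j].isalnum(); the fuel argument
-- (always ≥ n - j at every call) is the standard structural totalization of the while loop
def pvScanRun (cl : List Char) (n : Nat) : Nat → Nat → Nat
  | 0, j => j
  | fuel + 1, j =>
    if j < n ∧ PySem.Chars.isalnum (cl.getD j ' ') then pvScanRun cl n fuel (j + 1) else j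

-- outer while of Source B: parts/compact_map accumulators, two-pointer run copying
def pvRunLoop (cl : List Char) (im : List Int) (n : Nat) :
    Nat → Nat → List (List Char) → List Int → List (List Char) × List Int
  | 0, _, parts, cmap => (parts, cmap)
  | fuel + 1, i, parts, cmap =>
    if i < n then
      if ¬ PySem.Chars.isalnum (cl.getD i ' ') then
        pvRunLoop cl im n fuel (i + 1) parts cmap
      else
        let j := pvScanRun cl n (n - i) i
        pvRunLoop cl im n fuel j
          (parts ++ [PySem.Chars.slice cl (some (i : Int)) (some (j : Int))])
          ((PySem.List.pyRange (i : Int) (j : Int) 1).foldl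
            (fun acc k => acc ++ [(PySem.List.pyGet? im k).getD 0]) cmap)
    else (parts, cmap)

def compact_alnum_with_map_alt (text : String) (index_map : List Int) : String × List Int :=
  let cl := text.toList
  let st := pvRunLoop cl index_map cl.length cl.length 0 [] []
  (String.mk (PySem.Chars.join [] st.1), st.2)

-- ===== PRECONDITION & SPEC =====
-- Pre_ excludes exactly the inputs where Python A raises IndexError: an alphanumeric
-- character at a position not covered by index_map (B raises identically there).
def Pre_compact_alnum_with_map (text : String) (index_map : List Int) : Prop :=
  ∀ p ∈ PySem.List.enumerate text.toList 0, PySem.Chars.isalnum p.2 = true → p.1 < (index_map.length : Int)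
instance (text : String) (index_map : List Int) : Decidable (Pre_compact_alnum_with_map text index_map) := by unfold Pre_compact_alnum_with_map; infer_instance
def pvWitness_compact_alnum_with_map : String × List Int := ("a b!", [10, 20, 30, 40])
def Spec_compact_alnum_with_map (text : String) (index_map : List Int) (out : String × List Int) : Prop := out = compact_alnum_with_map_alt text index_map
instance (text : String) (index_map : List Int) (out : String × List Int) : Decidable (Spec_compact_alnum_with_map text index_map out) := by unfold Spec_compact_alnum_with_map; infer_instance

-- ===== CLAIM (what is proved, stated in full; the proofs are below) =====
def Claim_equal_compact_alnum_with_map : Prop := ∀ (text : String) (index_map : List Int), Dom_compact_alnum_with_map text index_map → Pre_compact_alnum_with_map text index_map → Spec_compact_alnum_with_map text index_map (compact_alnum_with_map text index_map)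

-- ===== LEMMAS AND PROOFS =====

-- common reference function: the filtered characters and mapped indices of l, positions
-- starting at s
def pvSpecGo (im : List Int) : List Char → Int → List Char × List Int
  | [], _ => ([], [])
  | c :: tl, s =>
    let r := pvSpecGo im tl (s + 1)
    if PySem.Chars.isalnum c then (c :: r.1, (PySem.List.pyGet? im s).getD 0 :: r.2) else r

-- A's loop, from any accumulator pair, appends pvSpecGo of the remaining characters
lemma loopA_eq (im : List Int) (l : List Char) :
    ∀ (s : Int) (cs : List Char) (ms : List Int),
    (PySem.List.enumerate l s).foldl
      (fun (acc : List Char × List Int) p =>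
        if !(PySem.Chars.isalnum p.2) then acc
        else (acc.1 ++ [p.2], acc.2 ++ [(PySem.List.pyGet? im p.1).getD 0]))
      (cs, ms)
    = (cs ++ (pvSpecGo im l s).1, ms ++ (pvSpecGo im l s).2) := by
  induction l with
  | nil => intro s cs ms; simp [PySem.List.enumerate_nil, pvSpecGo]
  | cons c tl ih =>
    intro s cs ms
    rw [PySem.List.enumerate_cons, List.foldl_cons]
    cases h : PySem.Chars.isalnum c
    · simp only [h, Bool.not_false, if_pos]
      rw [ih]; simp [pvSpecGo, h]
    · simp only [h, Bool.not_true, Bool.false_eq_true, if_neg, not_false_iff]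
      rw [ih]; simp [pvSpecGo, h]

-- the scan never moves left
lemma pvScanRun_ge (cl : List Char) (n : Nat) :
    ∀ fuel j, j ≤ pvScanRun cl n fuel j := by
  intro fuel
  induction fuel with
  | zero => intro j; simp [pvScanRun]
  | succ m ih =>
    intro j
    rw [pvScanRun]
    split
    · exact le_trans (by omega) (ih (j + 1))
    · exact le_refl j

-- the scan moves strictly right when started on an alphanumeric position
lemma pvScanRun_gt (cl : List Char) (n : Nat) (fuel j : Nat)
    (h : j < n ∧ PySem.Chars.isalnum (cl.getD j ' ')) (hf : 0 < fuel) :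
    j < pvScanRun cl n fuel j := by
  cases fuel with
  | zero => omega
  | succ m =>
    rw [pvScanRun, if_pos h]
    exact lt_of_lt_of_le (by omega) (pvScanRun_ge cl n m (j + 1))

-- the scan never passes n
lemma pvScanRun_le (cl : List Char) (n : Nat) :
    ∀ fuel j, j ≤ n → pvScanRun cl n fuel j ≤ n := by
  intro fuel
  induction fuel with
  | zero => intro j hj; simpa [pvScanRun] using hj
  | succ m ih =>
    intro j hj
    rw [pvScanRun]
    split
    · exact ih (j + 1) (by omega)
    · exact hj

-- every position passed over by the scan is an in-range alphanumeric one
lemma pvScanRun_run (cl : List Char) (n : Nat) :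
    ∀ fuel j k, j ≤ k → k < pvScanRun cl n fuel j →
      k < n ∧ PySem.Chars.isalnum (cl.getD k ' ') := by
  intro fuel
  induction fuel with
  | zero => intro j k hk1 hk2; rw [pvScanRun] at hk2; exact absurd hk2 (by omega)
  | succ m ih =>
    intro j k hk1 hk2
    rw [pvScanRun] at hk2
    by_cases h : j < n ∧ PySem.Chars.isalnum (cl.getD j ' ')
    · rw [if_pos h] at hk2
      rcases Nat.eq_or_lt_of_le hk1 with rfl | hlt
      · exact h
      · exact ih (j + 1) k hlt hk2
    · rw [if_neg h] at hk2
      exact absurd hk2 (by omega)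

-- a whole alphanumeric run [i, j) peels off the front of pvSpecGo
lemma pvSpecGo_run (cl : List Char) (im : List Int) (j : Nat) (hj : j ≤ cl.length) :
    ∀ i, i ≤ j → (∀ k, i ≤ k → k < j → PySem.Chars.isalnum (cl.getD k ' ')) →
    pvSpecGo im (cl.drop i) (i : Int)
      = ((cl.drop i).take (j - i) ++ (pvSpecGo im (cl.drop j) (j : Int)).1,
         (PySem.List.pyRange (i : Int) (j : Int) 1).map (fun k => (PySem.List.pyGet? im k).getD 0)
           ++ (pvSpecGo im (cl.drop j) (j : Int)).2) := by
  intro i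
  induction hd : j - i using Nat.strong_induction_on generalizing i with
  | _ m ih =>
  intro hij hrun
  subst hd
  by_cases heq : i = j
  · subst heq
    simp [PySem.List.pyRange, Nat.sub_self]
  · have hlt : i < j := by omega
    have hin : i < cl.length := by omega
    have hcons : cl.drop i = cl[i] :: cl.drop (i + 1) := List.drop_eq_getElem_cons hin
    have ha : PySem.Chars.isalnum cl[i] = true := by
      have := hrun i (le_refl i) hlt
      rwa [List.getD_eq_getElem cl ' ' hin] at this
    have hrec := ih (j - (i + 1)) (by omega) (i + 1) rfl (by omega)
      (fun k hk1 hk2 => hrun k (by omega) hk2)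
    have hca : ((i + 1 : Nat) : Int) = (i : Int) + 1 := by push_cast; ring
    rw [hca] at hrec
    have hpr : PySem.List.pyRange (i : Int) (j : Int) 1
        = (i : Int) :: PySem.List.pyRange ((i : Int) + 1) (j : Int) 1 :=
      PySem.List.pyRange_one_cons (by exact_mod_cast hlt)
    have htake : (cl[i] :: cl.drop (i + 1)).take (j - i)
        = cl[i] :: (cl.drop (i + 1)).take (j - (i + 1)) := by
      have h2 : j - i = (j - (i + 1)) + 1 := by omega
      rw [h2, List.take_succ_cons]
    rw [hcons]
    simp only [pvSpecGo, ha, if_pos]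
    rw [htake, hpr]
    simp only [List.map_cons, List.cons_append]
    rw [hrec]

-- B's outer loop, from any accumulators and enough fuel, appends pvSpecGo of the
-- remaining characters
lemma loopB_eq (cl : List Char) (im : List Int) :
    ∀ fuel i parts cmap, i ≤ cl.length → cl.length - i ≤ fuel →
      (pvRunLoop cl im cl.length fuel i parts cmap).1.flatten
          = parts.flatten ++ (pvSpecGo im (cl.drop i) (i : Int)).1
      ∧ (pvRunLoop cl im cl.length fuel i parts cmap).2
          = cmap ++ (pvSpecGo im (cl.drop i) (i : Int)).2 := by
  intro fuel
  induction fuel with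
  | zero =>
    intro i parts cmap hi hf
    have : i = cl.length := by omega
    subst this
    rw [pvRunLoop]
    simp [pvSpecGo]
  | succ m ih =>
    intro i parts cmap hi hf
    by_cases hlt : i < cl.length
    · have hcons : cl.drop i = cl[i] :: cl.drop (i + 1) := List.drop_eq_getElem_cons hlt
      have hgd : cl.getD i ' ' = cl[i] := List.getD_eq_getElem cl ' ' hlt
      by_cases ha : PySem.Chars.isalnum (cl.getD i ' ')
      · -- alphanumeric: a full run is copied
        rw [pvRunLoop, if_pos hlt, if_neg (by simpa using ha)]
        dsimp only
        set j := pvScanRun cl cl.length (cl.length - i) i with hj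
        have hij : i < j := pvScanRun_gt cl cl.length (cl.length - i) i ⟨hlt, ha⟩ (by omega)
        have hjn : j ≤ cl.length := pvScanRun_le cl cl.length (cl.length - i) i (by omega)
        have hrun : ∀ k, i ≤ k → k < j → PySem.Chars.isalnum (cl.getD k ' ') :=
          fun k h1 h2 => (pvScanRun_run cl cl.length (cl.length - i) i k h1 h2).2
        have hspec := pvSpecGo_run cl im j hjn i (by omega) hrun
        have hrec := ih j
          (parts ++ [PySem.Chars.slice cl (some (i : Int)) (some (j : Int))])
          ((PySem.List.pyRange (i : Int) (j : Int) 1).foldl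
            (fun acc k => acc ++ [(PySem.List.pyGet? im k).getD 0]) cmap) hjn (by omega)
        have hslice : PySem.List.slice cl (some (i : Int)) (some (j : Int))
            = (cl.drop i).take (j - i) := PySem.List.slice_natCast cl i j
        have hfold : (PySem.List.pyRange (i : Int) (j : Int) 1).foldl
              (fun acc k => acc ++ [(PySem.List.pyGet? im k).getD 0]) cmap
            = cmap ++ (PySem.List.pyRange (i : Int) (j : Int) 1).map
                (fun k => (PySem.List.pyGet? im k).getD 0) :=
          PySem.List.foldl_append_singleton_eq_map _ _ _
        constructor
        · rw [hrec.1, hspec]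
          simp [hslice]
        · rw [hrec.2, hspec, hfold]
          simp
      · -- not alphanumeric: skip one position
        rw [pvRunLoop, if_pos hlt, if_pos (by simpa using ha)]
        have hrec := ih (i + 1) parts cmap (by omega) (by omega)
        have hca : ((i + 1 : Nat) : Int) = (i : Int) + 1 := by push_cast; ring
        rw [hca] at hrec
        have ha' : PySem.Chars.isalnum cl[i] = false := by
          rw [hgd] at ha; simpa using ha
        constructor
        · rw [hrec.1, hcons]
          simp only [pvSpecGo, ha', Bool.false_eq_true, if_false]
        · rw [hrec.2, hcons]
          simp only [pvSpecGo, ha', Bool.false_eq_true, if_false]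
    · have : i = cl.length := by omega
      subst this
      rw [pvRunLoop, if_neg (by omega)]
      simp [pvSpecGo]

-- joining the run chunks with the empty separator is flattening
lemma join_nil_flatten (ps : List (List Char)) : PySem.Chars.join [] ps = ps.flatten := by
  induction ps with
  | nil => exact PySem.Chars.join_nil []
  | cons p tl ih =>
    cases tl with
    | nil => simpa using PySem.Chars.join_singleton ([] : List Char) p
    | cons q tl' =>
      rw [PySem.Chars.join_cons_cons, ih]
      simp

theorem compact_alnum_with_map_spec : Claim_equal_compact_alnum_with_map := by
  intro text index_map _ _
  unfold Spec_compact_alnum_with_map compact_alnum_with_map compact_alnum_with_map_alt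
  dsimp only
  have hB := loopB_eq text.toList index_map text.toList.length 0 [] [] (by omega) (by omega)
  simp only [List.drop_zero, Int.natCast_zero, List.flatten_nil, List.nil_append] at hB
  rw [loopA_eq, join_nil_flatten, hB.1, hB.2]
  simp
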